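-- pv_equiv track=rewrite | github.com/quavy123/z8086 | tests/bin2hex.py | find_nonzero_regions
-- ===== SOURCE A (Python) =====
-- def find_nonzero_regions(data, min_gap=16):
--     """
--     Find contiguous regions of non-zero bytes in binary data.
--
--     Args:
--         data: Binary data as bytes
--         min_gap: Minimum gap between regions to split them (default 16 bytes)
--
--     Returns:
--         List of (start_addr, end_addr) tuples for non-zero regions
--     """
--     regions = []
--     in_region = False
--     start = 0
--     last_nonzero = 0
--
--     for i, byte in enumerate(data):
--         if byte != 0:
--             if not in_region:
--                 # Start new region
--                 start = i
--                 in_region = True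
--             last_nonzero = i
--         elif in_region and (i - last_nonzero) >= min_gap:
--             # End region if we've seen enough zeros
--             regions.append((start, last_nonzero + 1))
--             in_region = False
--
--     # Close final region if still open
--     if in_region:
--         regions.append((start, last_nonzero + 1))
--
--     return regions
-- ===== SOURCE B (Python) =====
-- def find_nonzero_regions(data, min_gap=16):
--     """Group the non-zero positions by gap size instead of running a per-byte state machine."""
--     nz = [i for i, b in enumerate(data) if b]
--     if not nz:
--         return []
--     thr = max(min_gap, 1)
--     regions = []
--     start = prev = nz[0]
--     for p in nz[1:]:
--         if p - prev > thr:
--             regions.append((start, prev + 1))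
--             start = p
--         prev = p
--     regions.append((start, prev + 1))
--     return regions
-- ===== Notes on version B (the rewrite author's own statement) =====
-- stated objective: alternative
-- what changed: Replaces A's per-byte state machine (in_region flag, zero counting on every byte) by a filter-then-group pass: collect the non-zero positions once, then split them wherever consecutive positions are more than max(min_gap,1) apart.
import Mathlib
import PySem

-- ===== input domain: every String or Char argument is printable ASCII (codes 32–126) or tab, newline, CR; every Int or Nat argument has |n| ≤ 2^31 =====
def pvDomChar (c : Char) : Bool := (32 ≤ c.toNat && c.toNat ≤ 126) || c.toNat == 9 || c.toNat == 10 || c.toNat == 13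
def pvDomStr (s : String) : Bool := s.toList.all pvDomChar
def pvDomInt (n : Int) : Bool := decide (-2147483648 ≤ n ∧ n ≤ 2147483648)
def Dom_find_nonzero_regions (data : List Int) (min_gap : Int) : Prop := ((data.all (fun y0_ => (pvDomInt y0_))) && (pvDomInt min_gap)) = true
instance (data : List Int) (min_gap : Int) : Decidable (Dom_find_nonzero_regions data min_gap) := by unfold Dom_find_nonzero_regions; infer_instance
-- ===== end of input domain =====

-- B collects the non-zero positions once and groups them by gap size (> max(min_gap,1)),
-- replacing A's per-byte state machine; same return value, alternative decomposition.

-- ===== PORT A =====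
-- for i, byte in enumerate(data): ... with state (regions, in_region, start, last_nonzero)
def pvLoopA (min_gap : Int) : List Int → Int → List (Int × Int) → Bool → Int → Int → List (Int × Int)
  | [], _, regions, in_region, start, last_nonzero =>
      if in_region then regions ++ [(start, last_nonzero + 1)] else regions
  | byte :: rest, i, regions, in_region, start, last_nonzero =>
      if byte ≠ 0 then
        pvLoopA min_gap rest (i + 1) regions true (if in_region then start else i) i
      else if in_region ∧ i - last_nonzero ≥ min_gap then
        pvLoopA min_gap rest (i + 1) (regions ++ [(start, last_nonzero + 1)]) false start last_nonzero
      else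
        pvLoopA min_gap rest (i + 1) regions in_region start last_nonzero

def find_nonzero_regions (data : List Int) (min_gap : Int) : List (Int × Int) :=
  pvLoopA min_gap data 0 [] false 0 0

-- ===== PORT B =====
-- nz = [i for i, b in enumerate(data) if b]
def pvNzFrom : List Int → Int → List Int
  | [], _ => []
  | b :: rest, i => if b ≠ 0 then i :: pvNzFrom rest (i + 1) else pvNzFrom rest (i + 1)

-- for p in nz[1:]: ... with state (regions, start, prev); final append after the loop
def pvLoopB (thr : Int) : List Int → List (Int × Int) → Int → Int → List (Int × Int)
  | [], regions, start, prev => regions ++ [(start, prev + 1)]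
  | p :: rest, regions, start, prev =>
      if p - prev > thr then pvLoopB thr rest (regions ++ [(start, prev + 1)]) p p
      else pvLoopB thr rest regions start p

def find_nonzero_regions_alt (data : List Int) (min_gap : Int) : List (Int × Int) :=
  match pvNzFrom data 0 with
  | [] => []
  | p0 :: rest => pvLoopB (max min_gap 1) rest [] p0 p0

-- ===== PRECONDITION & SPEC =====
def Spec_find_nonzero_regions (data : List Int) (min_gap : Int) (out : List (Int × Int)) : Prop := out = find_nonzero_regions_alt data min_gap
instance (data : List Int) (min_gap : Int) (out : List (Int × Int)) : Decidable (Spec_find_nonzero_regions data min_gap out) := by unfold Spec_find_nonzero_regions; infer_instance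

-- ===== CLAIM (what is proved, stated in full; the proofs are below) =====
def Claim_equal_find_nonzero_regions : Prop := ∀ (data : List Int) (min_gap : Int), Dom_find_nonzero_regions data min_gap → Spec_find_nonzero_regions data min_gap (find_nonzero_regions data min_gap)

-- ===== LEMMAS AND PROOFS =====

-- Joint invariant for the open-region and closed-region states of A's loop versus B's loop.
lemma pvAB (min_gap : Int) (xs : List Int) : ∀ (i : Int) (regs : List (Int × Int)) (start prev : Int),
    (prev < i → i - prev ≤ max min_gap 1 →
      pvLoopA min_gap xs i regs true start prev
        = pvLoopB (max min_gap 1) (pvNzFrom xs i) regs start prev)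
    ∧
    (i - prev > max min_gap 1 →
      pvLoopA min_gap xs i (regs ++ [(start, prev + 1)]) false start prev
        = pvLoopB (max min_gap 1) (pvNzFrom xs i) regs start prev) := by
  induction xs with
  | nil =>
      intro i regs start prev
      constructor
      · intro _ _; simp [pvLoopA, pvNzFrom, pvLoopB]
      · intro _; simp [pvLoopA, pvNzFrom, pvLoopB]
  | cons b rest ih =>
      intro i regs start prev
      constructor
      · intro hlt hle
        by_cases hb : b ≠ 0
        · simp only [pvLoopA, pvNzFrom, pvLoopB, if_pos hb, if_true]
          rw [if_neg (by omega : ¬ i - prev > max min_gap 1)]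
          exact (ih (i + 1) regs start i).1 (by omega) (by omega)
        · simp only [pvLoopA, pvNzFrom, if_neg hb, true_and]
          by_cases hc : i - prev ≥ min_gap
          · rw [if_pos hc]
            exact (ih (i + 1) regs start prev).2 (by omega)
          · rw [if_neg hc]
            exact (ih (i + 1) regs start prev).1 (by omega) (by omega)
      · intro hgt
        by_cases hb : b ≠ 0
        · simp only [pvLoopA, pvNzFrom, pvLoopB, if_pos hb, Bool.false_eq_true, if_false]
          rw [if_pos hgt]
          exact (ih (i + 1) (regs ++ [(start, prev + 1)]) i i).1 (by omega) (by omega)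
        · simp only [pvLoopA, pvNzFrom, if_neg hb, Bool.false_eq_true, false_and, if_false]
          exact (ih (i + 1) regs start prev).2 (by omega)

-- Before the first non-zero byte, A's loop state is inert and both sides agree.
lemma pvPre (min_gap : Int) (xs : List Int) : ∀ (i s l : Int),
    pvLoopA min_gap xs i [] false s l
      = (match pvNzFrom xs i with
         | [] => ([] : List (Int × Int))
         | p0 :: rest => pvLoopB (max min_gap 1) rest [] p0 p0) := by
  induction xs with
  | nil => intro i s l; simp [pvLoopA, pvNzFrom]
  | cons b rest ih =>
      intro i s l
      by_cases hb : b ≠ 0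
      · simp only [pvLoopA, pvNzFrom, if_pos hb, Bool.false_eq_true, if_false]
        exact (pvAB min_gap rest (i + 1) [] i i).1 (by omega) (by omega)
      · simp only [pvLoopA, pvNzFrom, if_neg hb, Bool.false_eq_true, false_and, if_false]
        exact ih (i + 1) s l

-- ===== VERDICT (by name: the statement is the Claim_ definition above) =====
theorem find_nonzero_regions_spec : Claim_equal_find_nonzero_regions := by
  intro data min_gap _
  unfold Spec_find_nonzero_regions find_nonzero_regions find_nonzero_regions_alt
  exact pvPre min_gap data 0 0 0
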